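-- pv_equiv track=rewrite | github.com/dimon-ton/printPorpo2 | main.py | convert_to_thai_number
-- ===== SOURCE A (Python) =====
-- def convert_to_thai_number(number_str):
--     """
--     Converts a standard number string to a Thai numeral string.
--
--     Parameters:
--         number_str (str): A string containing standard Arabic numerals (e.g., "123456").
--
--     Returns:
--         str: A string containing Thai numerals (e.g., "๑๒๓๔๕๖").
--     """
--     # Mapping of Arabic numerals to Thai numerals
--     arabic_to_thai = {
--         '0': '๐',
--         '1': '๑',
--         '2': '๒',
--         '3': '๓',
--         '4': '๔',
--         '5': '๕',
--         '6': '๖',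
--         '7': '๗',
--         '8': '๘',
--         '9': '๙'
--     }
--
--     # Convert each character in the input string using the mapping
--     thai_number_str = ''.join(arabic_to_thai.get(char, char) for char in number_str)
--
--     return thai_number_str
-- ===== SOURCE B (Python) =====
-- THAI_DIGITS = '๐๑๒๓๔๕๖๗๘๙'
--
-- def convert_to_thai_number(number_str):
--     """Staged re-implementation: ten whole-string replace passes, one per digit.
--
--     Correct because each pass substitutes a Thai numeral, which is never a
--     pattern of a later pass, so the passes are independent."""
--     for d, t in zip('0123456789', THAI_DIGITS):
--         number_str = number_str.replace(d, t)
--     return number_str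
-- ===== Notes on version B (the rewrite author's own statement) =====
-- stated objective: faster
-- what changed: Replaced A's single Python-level pass with a per-character dict lookup and join by ten staged whole-string str.replace passes, one per digit (correct because a Thai numeral is never a later pass's pattern); the per-character work moves into C-level str.replace.
import Mathlib
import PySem

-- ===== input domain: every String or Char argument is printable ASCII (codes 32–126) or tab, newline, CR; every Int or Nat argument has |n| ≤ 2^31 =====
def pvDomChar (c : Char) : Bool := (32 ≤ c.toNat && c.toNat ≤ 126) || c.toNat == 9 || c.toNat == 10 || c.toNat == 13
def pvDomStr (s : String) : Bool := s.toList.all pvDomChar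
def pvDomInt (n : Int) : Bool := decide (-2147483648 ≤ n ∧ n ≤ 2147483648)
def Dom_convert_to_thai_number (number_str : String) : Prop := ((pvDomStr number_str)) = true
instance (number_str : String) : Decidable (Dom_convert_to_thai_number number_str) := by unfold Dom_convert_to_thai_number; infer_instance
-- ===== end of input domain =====

-- B replaces A's single per-character dict-lookup pass by ten staged whole-string replace passes (one per digit); same asymptotic cost, no lookup table, no per-char branch.


-- ===== PORT A =====
-- A's literal mapping table (Python's arabic_to_thai dict)
def arabicToThai : PySem.Dict Char Char := PySem.Dict.ofList
  [('0','๐'),('1','๑'),('2','๒'),('3','๓'),('4','๔'),('5','๕'),('6','๖'),('7','๗'),('8','๘'),('9','๙')]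

def convert_to_thai_number (number_str : String) : String :=
  -- ''.join(arabic_to_thai.get(char, char) for char in number_str)
  String.ofList (number_str.toList.map (fun ch => arabicToThai.getD ch ch))

-- ===== PORT B =====
-- zip('0123456789', THAI_DIGITS) from Source B
def pvPairs : List (Char × Char) := List.zip "0123456789".toList "๐๑๒๓๔๕๖๗๘๙".toList

def convert_to_thai_number_alt (number_str : String) : String :=
  -- for d, t in zip(...): number_str = number_str.replace(d, t)
  pvPairs.foldl (fun s dt => PySem.Str.replace s (String.ofList [dt.1]) (String.ofList [dt.2])) number_str

-- ===== PRECONDITION & SPEC =====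
def Spec_convert_to_thai_number (number_str : String) (out : String) : Prop := out = convert_to_thai_number_alt number_str
instance (number_str : String) (out : String) : Decidable (Spec_convert_to_thai_number number_str out) := by unfold Spec_convert_to_thai_number; infer_instance

-- ===== CLAIM (what is proved, stated in full; the proofs are below) =====
def Claim_equal_convert_to_thai_number : Prop := ∀ (number_str : String), Dom_convert_to_thai_number number_str → Spec_convert_to_thai_number number_str (convert_to_thai_number number_str)

-- ===== LEMMAS AND PROOFS =====

-- replace with a single-character pattern and replacement is a character-wise substitution
theorem go_singleton (d t : Char) : ∀ (l acc : List Char) (fuel : Nat), l.length ≤ fuel →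
    PySem.Chars.replace.go [d] [t] fuel l acc =
      acc.reverse ++ l.map (fun c => if c = d then t else c) := by
  intro l
  induction l with
  | nil => intro acc fuel _; cases fuel <;> simp [PySem.Chars.replace.go]
  | cons c tl ih =>
    intro acc fuel hf
    cases fuel with
    | zero => simp at hf
    | succ n =>
      rw [PySem.Chars.replace.go]
      by_cases h : c = d
      · subst h
        simp [List.isPrefixOf, ih (t :: acc) n (by simpa using hf)]
      · have hp : [d].isPrefixOf (c :: tl) = false := by
          simp [List.isPrefixOf]; exact fun hh => h hh.symm
        simp [hp, ih (c :: acc) n (by simpa using hf), h]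

theorem replace_singleton (d t : Char) (l : List Char) :
    PySem.Chars.replace l [d] [t] = l.map (fun c => if c = d then t else c) := by
  rw [PySem.Chars.replace]
  simp [go_singleton d t l [] l.length le_rfl]

-- the staged replace passes amount to mapping the composed substitution over the characters
theorem foldl_replace (ps : List (Char × Char)) (s : String) :
    (ps.foldl (fun s dt => PySem.Str.replace s (String.ofList [dt.1]) (String.ofList [dt.2])) s).toList
      = s.toList.map (fun c => ps.foldl (fun x dt => if x = dt.1 then dt.2 else x) c) := by
  induction ps generalizing s with
  | nil => simp
  | cons p ps ih =>
    rw [List.foldl_cons, ih]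
    simp only [List.foldl_cons]
    have : (PySem.Str.replace s (String.ofList [p.1]) (String.ofList [p.2])).toList
        = s.toList.map (fun c => if c = p.1 then p.2 else c) := by
      simp [PySem.Str.toList_replace, String.toList_ofList, replace_singleton]
    rw [this, List.map_map]
    rfl

-- per-character agreement: A's dict lookup-with-default equals B's composed substitution chain
theorem charMap_eq (c : Char) :
    arabicToThai.getD c c =
      pvPairs.foldl (fun x dt => if x = dt.1 then dt.2 else x) c := by
  by_cases h : 48 ≤ c.toNat ∧ c.toNat ≤ 57
  · have hc : c = Char.ofNat c.toNat := (Char.ofNat_toNat c).symm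
    obtain ⟨h1, h2⟩ := h
    rw [hc]
    interval_cases hn : c.toNat <;> decide
  · have key : ∀ d : Char, 48 ≤ d.toNat → d.toNat ≤ 57 → (d == c) = false := by
      intro d a b
      simp only [beq_eq_false_iff_ne]
      rintro rfl; omega
    have keq : ∀ d : Char, 48 ≤ d.toNat → d.toNat ≤ 57 → ¬ (c = d) := by
      intro d a b hh; subst hh; exact h ⟨a, b⟩
    have htab : arabicToThai = PySem.Dict.mk
        [('0','๐'),('1','๑'),('2','๒'),('3','๓'),('4','๔'),('5','๕'),('6','๖'),('7','๗'),('8','๘'),('9','๙')] := by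
      decide
    have hpr : pvPairs = [('0','๐'),('1','๑'),('2','๒'),('3','๓'),('4','๔'),('5','๕'),('6','๖'),('7','๗'),('8','๘'),('9','๙')] := by
      decide
    rw [htab, hpr]
    simp [List.foldl, PySem.Dict.getD, PySem.Dict.get?,
      key '0' (by decide) (by decide), key '1' (by decide) (by decide), key '2' (by decide) (by decide),
      key '3' (by decide) (by decide), key '4' (by decide) (by decide), key '5' (by decide) (by decide),
      key '6' (by decide) (by decide), key '7' (by decide) (by decide), key '8' (by decide) (by decide),
      key '9' (by decide) (by decide),
      keq '0' (by decide) (by decide), keq '1' (by decide) (by decide), keq '2' (by decide) (by decide),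
      keq '3' (by decide) (by decide), keq '4' (by decide) (by decide), keq '5' (by decide) (by decide),
      keq '6' (by decide) (by decide), keq '7' (by decide) (by decide), keq '8' (by decide) (by decide),
      keq '9' (by decide) (by decide)]

-- ===== VERDICT (by name: the statement is the Claim_ definition above) =====
theorem convert_to_thai_number_spec : Claim_equal_convert_to_thai_number := by
  intro s _
  unfold Spec_convert_to_thai_number
  have h : (convert_to_thai_number s).toList = (convert_to_thai_number_alt s).toList := by
    unfold convert_to_thai_number convert_to_thai_number_alt
    rw [foldl_replace]
    simp only [String.toList_ofList]
    exact List.map_congr_left (fun c _ => charMap_eq c)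
  exact String.toList_inj.mp h
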